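-- pv_equiv track=rewrite | github.com/luissantaospina/python | course_in_coursera/Semana_4/Tuplas/votos_estados.py | votos_por_candidato
-- ===== SOURCE A (Python) =====
-- def votos_por_candidato(votos_a_validar: list, estado_a_analizar: str) -> tuple:
--     votos_petro = 0
--     votos_fico = 0
--     for voto in votos_a_validar:
--         if voto[2] == estado_a_analizar:
--             if voto[1] == 'Petro':
--                 votos_petro += 1
--             else:
--                 votos_fico += 1
--     return votos_petro, votos_fico
-- ===== SOURCE B (Python) =====
-- def votos_por_candidato(votos_a_validar: list, estado_a_analizar: str) -> tuple:
--     # Build a tally keyed by (state, is_petro) in one grouping pass, then answer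
--     # by two dictionary lookups; no per-element state/candidate branching.
--     conteo = {}
--     for voto in votos_a_validar:
--         clave = (voto[2], voto[1] == 'Petro')
--         conteo[clave] = conteo.get(clave, 0) + 1
--     return conteo.get((estado_a_analizar, True), 0), conteo.get((estado_a_analizar, False), 0)
-- ===== Notes on version B (the rewrite author's own statement) =====
-- stated objective: alternative
-- what changed: B builds a hash tally keyed by (state, is_petro) over all votes in one grouping pass with no state comparison inside the loop, then reads the two answers off with dictionary lookups, instead of A's nested-if counter accumulation filtered to the requested state.
import Mathlib
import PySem

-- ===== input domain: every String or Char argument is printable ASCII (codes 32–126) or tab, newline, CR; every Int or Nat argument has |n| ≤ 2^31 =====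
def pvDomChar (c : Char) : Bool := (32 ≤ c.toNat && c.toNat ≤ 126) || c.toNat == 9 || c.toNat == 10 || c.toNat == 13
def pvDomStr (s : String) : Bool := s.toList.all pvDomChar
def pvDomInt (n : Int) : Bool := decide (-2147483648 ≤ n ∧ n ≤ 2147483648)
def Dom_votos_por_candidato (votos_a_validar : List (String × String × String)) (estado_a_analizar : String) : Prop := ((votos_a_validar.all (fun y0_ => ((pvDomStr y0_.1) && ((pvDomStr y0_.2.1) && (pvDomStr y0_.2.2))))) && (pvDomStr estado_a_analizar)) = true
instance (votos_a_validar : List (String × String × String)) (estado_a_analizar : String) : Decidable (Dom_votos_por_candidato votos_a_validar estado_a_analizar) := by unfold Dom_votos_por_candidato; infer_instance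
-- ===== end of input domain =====

-- B replaces A's state-filtered nested-if counters by one grouping pass into a dict keyed by
-- (state, is_petro) followed by two lookups (objective: alternative).

-- ===== PORT A =====
-- literal port: fold over the votes carrying the (petro, fico) accumulator pair
def votos_por_candidato (votos_a_validar : List (String × String × String)) (estado_a_analizar : String) : Int × Int :=
  votos_a_validar.foldl
    (fun (acc : Int × Int) voto =>
      if voto.2.2 == estado_a_analizar then
        if voto.2.1 == "Petro" then (acc.1 + 1, acc.2)
        else (acc.1, acc.2 + 1)
      else acc)
    (0, 0)

-- ===== PORT B =====
-- literal port of Source B: build the (state, is_petro) tally dict, then two lookups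
def votos_por_candidato_alt (votos_a_validar : List (String × String × String)) (estado_a_analizar : String) : Int × Int :=
  let conteo : PySem.Dict (String × Bool) Int :=
    votos_a_validar.foldl
      (fun d voto =>
        let clave := (voto.2.2, voto.2.1 == "Petro")
        d.insert clave (d.getD clave 0 + 1))
      PySem.Dict.empty
  (conteo.getD (estado_a_analizar, true) 0, conteo.getD (estado_a_analizar, false) 0)

-- ===== PRECONDITION & SPEC =====
def Spec_votos_por_candidato (votos_a_validar : List (String × String × String)) (estado_a_analizar : String) (out : Int × Int) : Prop := out = votos_por_candidato_alt votos_a_validar estado_a_analizar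
instance (votos_a_validar : List (String × String × String)) (estado_a_analizar : String) (out : Int × Int) : Decidable (Spec_votos_por_candidato votos_a_validar estado_a_analizar out) := by unfold Spec_votos_por_candidato; infer_instance

-- ===== CLAIM (what is proved, stated in full; the proofs are below) =====
def Claim_equal_votos_por_candidato : Prop := ∀ (votos_a_validar : List (String × String × String)) (estado_a_analizar : String), Dom_votos_por_candidato votos_a_validar estado_a_analizar → Spec_votos_por_candidato votos_a_validar estado_a_analizar (votos_por_candidato votos_a_validar estado_a_analizar)

-- ===== LEMMAS AND PROOFS =====
-- A's fold from any accumulator adds the two predicate counts componentwise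
theorem votos_foldl_counts (votos : List (String × String × String)) (e : String) (a b : Int) :
    votos.foldl
      (fun (acc : Int × Int) voto =>
        if voto.2.2 == e then
          if voto.2.1 == "Petro" then (acc.1 + 1, acc.2)
          else (acc.1, acc.2 + 1)
        else acc)
      (a, b)
    = (a + (votos.countP (fun v => v.2.2 == e && v.2.1 == "Petro") : Int),
       b + (votos.countP (fun v => v.2.2 == e && !(v.2.1 == "Petro")) : Int)) := by
  induction votos generalizing a b with
  | nil => simp
  | cons v t ih =>
    by_cases h1 : v.2.2 == e
    · by_cases h2 : v.2.1 == "Petro"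
      · simp only [List.foldl_cons, List.countP_cons, h1, h2, if_true, Bool.and_self, ih,
          Prod.mk.injEq]
        constructor <;> simp <;> push_cast <;> ring
      · simp only [List.foldl_cons, List.countP_cons, h1, h2, if_true, Bool.false_eq_true,
          if_false, Bool.and_true, Bool.and_false, Bool.not_false, ih, Prod.mk.injEq]
        constructor <;> simp <;> push_cast <;> ring
    · simp only [List.foldl_cons, List.countP_cons, h1, Bool.false_eq_true, if_false,
        Bool.false_and, ih]
      simp

-- B's tally lookup is a mapped count
theorem tally_getD (votos : List (String × String × String)) (k : String × Bool) :
    (votos.foldl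
      (fun (d : PySem.Dict (String × Bool) Int) voto =>
        let clave := (voto.2.2, voto.2.1 == "Petro")
        d.insert clave (d.getD clave 0 + 1))
      PySem.Dict.empty).getD k 0
    = ((votos.map (fun v => (v.2.2, v.2.1 == "Petro"))).count k : Int) := by
  have h : (votos.foldl
      (fun (d : PySem.Dict (String × Bool) Int) voto =>
        let clave := (voto.2.2, voto.2.1 == "Petro")
        d.insert clave (d.getD clave 0 + 1))
      PySem.Dict.empty)
    = ((votos.map (fun v => (v.2.2, v.2.1 == "Petro"))).foldl
        (fun (d : PySem.Dict (String × Bool) Int) x => d.insert x (d.getD x 0 + 1))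
        PySem.Dict.empty) := by
    rw [List.foldl_map]
  rw [h, PySem.Dict.getD_foldl_insert_add_one, PySem.Dict.getD_empty]
  simp

-- ===== VERDICT (by name: the statement is the Claim_ definition above) =====
theorem votos_por_candidato_spec : Claim_equal_votos_por_candidato := by
  intro votos e _
  show votos_por_candidato votos e = votos_por_candidato_alt votos e
  simp only [votos_por_candidato, votos_por_candidato_alt, votos_foldl_counts, tally_getD,
    List.count_eq_countP, List.countP_map, Prod.mk.injEq]
  constructor
  · rw [zero_add]; congr 1
    apply List.countP_congr; intro v _
    simp [Function.comp, Prod.ext_iff]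
  · rw [zero_add]; congr 1
    apply List.countP_congr; intro v _
    simp [Function.comp, Prod.ext_iff]
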